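-- pv_equiv track=rewrite | github.com/maximxlss/nto-2024-xls-team | pwn2/genpb.py | genpb
-- ===== SOURCE A (Python) =====
-- def genpb(curr_value, targ_value, add_value, mod=256, limit=1024):
-- 	val = curr_value
-- 	c = 0
-- 	if (curr_value == targ_value): return 0
-- 	for i in range(limit):
-- 		c += 1
-- 		val += add_value
-- 		val %= mod
-- 		if val == targ_value:
-- 			return c
-- 	return -1
-- ===== SOURCE B (Python) =====
-- def _egcd(a, b):
--     # extended Euclid on nonnegative ints: returns (g, x, y) with a*x + b*y == g = gcd
--     if b == 0:
--         return (a, 1, 0)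
--     g, x, y = _egcd(b, a % b)
--     return (g, y, x - (a // b) * y)
--
--
-- def genpb(curr_value, targ_value, add_value, mod=256, limit=1024):
--     # closed form: minimal c >= 1 with (curr_value + c*add_value) % mod == targ_value,
--     # found by solving the linear congruence with extended gcd instead of stepping.
--     if curr_value == targ_value:
--         return 0
--     if limit < 1:
--         return -1
--     if targ_value != targ_value % mod:
--         return -1
--     M = abs(mod)
--     a = add_value % M
--     b = (targ_value - curr_value) % M
--     g, x, _ = _egcd(a, M)
--     if b % g != 0:
--         return -1
--     n = M // g
--     c0 = (b // g) * x % n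
--     c = c0 if c0 >= 1 else n
--     return c if c <= limit else -1
-- ===== Notes on version B (the rewrite author's own statement) =====
-- stated objective: faster
-- what changed: A steps through the sequence up to `limit` times looking for the target; B solves the linear congruence curr + c*add = targ (mod mod) in closed form with an extended gcd and returns the minimal positive solution if it is within limit.
import Mathlib
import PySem

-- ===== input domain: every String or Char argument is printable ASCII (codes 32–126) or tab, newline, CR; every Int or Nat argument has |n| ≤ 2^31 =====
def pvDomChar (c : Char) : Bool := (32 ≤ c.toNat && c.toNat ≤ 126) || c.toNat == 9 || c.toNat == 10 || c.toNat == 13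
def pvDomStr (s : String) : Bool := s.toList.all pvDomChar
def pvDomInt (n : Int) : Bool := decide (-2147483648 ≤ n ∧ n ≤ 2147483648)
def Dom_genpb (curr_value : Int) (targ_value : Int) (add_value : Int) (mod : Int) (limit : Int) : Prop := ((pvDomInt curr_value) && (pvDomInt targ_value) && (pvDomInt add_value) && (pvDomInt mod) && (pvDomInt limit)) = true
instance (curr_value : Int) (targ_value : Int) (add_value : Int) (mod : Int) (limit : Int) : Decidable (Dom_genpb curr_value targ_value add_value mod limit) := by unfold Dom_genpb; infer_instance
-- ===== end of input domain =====

-- B solves the linear congruence curr + c*add ≡ targ (mod mod) in closed form with an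
-- extended gcd instead of A's step-by-step search; the RETURN value is proved equal on Pre_.

-- ===== PORT A =====
-- the for-loop of A: state (val, c), fuel = the remaining iterations of range(limit)
def genpbLoop (targ_value add_value mod : Int) : Int → Int → Nat → Int
  | _, _, 0 => -1
  | val, c, Nat.succ f =>
    let c' := c + 1
    let v := PySem.Int.mod (val + add_value) mod
    if v = targ_value then c' else genpbLoop targ_value add_value mod v c' f

def genpb (curr_value : Int) (targ_value : Int) (add_value : Int) (mod : Int) (limit : Int) : Int :=
  if curr_value = targ_value then 0
  else genpbLoop targ_value add_value mod curr_value 0 limit.toNat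

-- ===== PORT B =====
-- _egcd of Source B; both arguments are nonnegative Python ints at every call site, so Nat is exact
def egcd (a b : Nat) : Int × Int × Int :=
  if h : b = 0 then ((a : Int), 1, 0)
  else
    let r := egcd b (a % b)
    (r.1, r.2.2, r.2.1 - PySem.Int.floordiv (a : Int) (b : Int) * r.2.2)
termination_by b
decreasing_by exact Nat.mod_lt _ (Nat.pos_of_ne_zero h)

def genpb_alt (curr_value : Int) (targ_value : Int) (add_value : Int) (mod : Int) (limit : Int) : Int :=
  if curr_value = targ_value then 0
  else if limit < 1 then -1
  else if targ_value ≠ PySem.Int.mod targ_value mod then -1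
  else
    let M : Int := |mod|
    let a := PySem.Int.mod add_value M
    let b := PySem.Int.mod (targ_value - curr_value) M
    let r := egcd a.toNat M.toNat
    let g := r.1
    let x := r.2.1
    if PySem.Int.mod b g ≠ 0 then -1
    else
      let n := PySem.Int.floordiv M g
      let c0 := PySem.Int.mod (PySem.Int.floordiv b g * x) n
      let c := if 1 ≤ c0 then c0 else n
      if c ≤ limit then c else -1

-- ===== PRECONDITION & SPEC =====
-- Pre_ excludes exactly the inputs where A raises ZeroDivisionError (mod = 0 with the loop entered); B raises there too.
def Pre_genpb (curr_value : Int) (targ_value : Int) (add_value : Int) (mod : Int) (limit : Int) : Prop :=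
  mod ≠ 0 ∨ limit < 1 ∨ curr_value = targ_value
instance (curr_value : Int) (targ_value : Int) (add_value : Int) (mod : Int) (limit : Int) : Decidable (Pre_genpb curr_value targ_value add_value mod limit) := by unfold Pre_genpb; infer_instance

def pvWitness_genpb : Int × Int × Int × Int × Int := (3, 7, 5, 256, 1024)

def Spec_genpb (curr_value : Int) (targ_value : Int) (add_value : Int) (mod : Int) (limit : Int) (out : Int) : Prop := out = genpb_alt curr_value targ_value add_value mod limit
instance (curr_value : Int) (targ_value : Int) (add_value : Int) (mod : Int) (limit : Int) (out : Int) : Decidable (Spec_genpb curr_value targ_value add_value mod limit out) := by unfold Spec_genpb; infer_instance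

-- ===== CLAIM (what is proved, stated in full; the proofs are below) =====
def Claim_equal_genpb : Prop := ∀ (curr_value : Int) (targ_value : Int) (add_value : Int) (mod : Int) (limit : Int), Dom_genpb curr_value targ_value add_value mod limit → Pre_genpb curr_value targ_value add_value mod limit → Spec_genpb curr_value targ_value add_value mod limit (genpb curr_value targ_value add_value mod limit)

-- ===== LEMMAS AND PROOFS =====

theorem pmod_sub_dvd (x m : Int) : m ∣ x - PySem.Int.mod x m := by
  have h := PySem.Int.floordiv_mul_add_mod x m
  exact ⟨PySem.Int.floordiv x m, by linarith⟩

theorem pmod_congr (m x y : Int) (hm : m ≠ 0) (h : m ∣ x - y) :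
    PySem.Int.mod x m = PySem.Int.mod y m := by
  have hx := PySem.Int.floordiv_mul_add_mod x m
  have hy := PySem.Int.floordiv_mul_add_mod y m
  have hd : |m| ∣ (PySem.Int.mod x m - PySem.Int.mod y m) := by
    rw [abs_dvd]
    have : PySem.Int.mod x m - PySem.Int.mod y m
        = (x - y) - (PySem.Int.floordiv x m - PySem.Int.floordiv y m) * m := by ring_nf; linarith
    rw [this]
    exact dvd_sub h (Dvd.intro_left _ rfl)
  rcases lt_trichotomy m 0 with hneg | hz | hpos
  · have b1 := PySem.Int.mod_neg_bounds (a := x) hneg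
    have b2 := PySem.Int.mod_neg_bounds (a := y) hneg
    have hM : |m| = -m := abs_of_neg hneg
    have := Int.eq_zero_of_abs_lt_dvd hd (by rw [abs_lt]; omega)
    omega
  · exact absurd hz hm
  · have b1 := PySem.Int.mod_nonneg (a := x) hpos
    have b2 := PySem.Int.mod_lt (a := x) hpos
    have b3 := PySem.Int.mod_nonneg (a := y) hpos
    have b4 := PySem.Int.mod_lt (a := y) hpos
    have hM : |m| = m := abs_of_pos hpos
    have := Int.eq_zero_of_abs_lt_dvd hd (by rw [abs_lt]; omega)
    omega

theorem pmod_eq_pmod_iff (m x y : Int) (hm : m ≠ 0) :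
    PySem.Int.mod x m = PySem.Int.mod y m ↔ m ∣ x - y := by
  constructor
  · intro h
    have hx := pmod_sub_dvd x m
    have hy := pmod_sub_dvd y m
    have : x - y = (x - PySem.Int.mod x m) - (y - PySem.Int.mod y m) := by rw [h]; ring
    rw [this]; exact dvd_sub hx hy
  · exact pmod_congr m x y hm

theorem pmod_idem (m x : Int) (hm : m ≠ 0) :
    PySem.Int.mod (PySem.Int.mod x m) m = PySem.Int.mod x m := by
  apply pmod_congr m _ x hm
  have h := pmod_sub_dvd x m
  have : PySem.Int.mod x m - x = -(x - PySem.Int.mod x m) := by ring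
  rw [this]; exact dvd_neg.mpr h

theorem egcd_gcd (a b : Nat) : (egcd a b).1 = (Nat.gcd b a : Int) := by
  induction a, b using egcd.induct with
  | case1 a => simp [egcd]
  | case2 a b h ih =>
    rw [egcd]
    simp only [h, dite_false]
    rw [ih, Nat.gcd_rec b a]

theorem egcd_bezout (a b : Nat) :
    (a : Int) * (egcd a b).2.1 + (b : Int) * (egcd a b).2.2 = (egcd a b).1 := by
  induction a, b using egcd.induct with
  | case1 a => simp [egcd]
  | case2 a b h ih =>
    rw [egcd]
    simp only [h, dite_false]
    have hb : 0 < b := Nat.pos_of_ne_zero h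
    have hdiv : PySem.Int.floordiv (a : Int) (b : Int) = ((a / b : Nat) : Int) :=
      PySem.Int.floordiv_natCast a b
    have hmod : ((a % b : Nat) : Int) = (a : Int) - ((a / b : Nat) : Int) * (b : Int) := by
      push_cast
      have := Nat.mod_add_div a b
      push_cast at this
      linarith
    rw [hdiv]
    set r := egcd b (a % b) with hr
    have := ih
    rw [hmod] at this
    ring_nf
    ring_nf at this
    linarith

theorem dvd_congr_sub (m v w : Int) (h : m ∣ v - w) : m ∣ v ↔ m ∣ w := by
  constructor
  · intro hv; have := dvd_sub hv h; simpa using this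
  · intro hw; have := dvd_add h hw; simpa using this

theorem loop_none (targ add m curr : Int) (hm : m ≠ 0) :
    ∀ (f : Nat) (val c : Int),
      PySem.Int.mod val m = PySem.Int.mod (curr + c * add) m →
      (∀ k : Int, c < k → k ≤ c + f → PySem.Int.mod (curr + k * add) m ≠ targ) →
      genpbLoop targ add m val c f = -1 := by
  intro f
  induction f with
  | zero => intro val c _ _; rfl
  | succ f ih =>
    intro val c hval hnone
    have hstep : PySem.Int.mod (val + add) m = PySem.Int.mod (curr + (c + 1) * add) m := by
      apply pmod_congr m _ _ hm
      have hd : m ∣ val - (curr + c * add) := (pmod_eq_pmod_iff m _ _ hm).mp hval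
      have : val + add - (curr + (c + 1) * add) = val - (curr + c * add) := by ring
      rw [this]; exact hd
    show (if PySem.Int.mod (val + add) m = targ then c + 1
          else genpbLoop targ add m (PySem.Int.mod (val + add) m) (c + 1) f) = -1
    rw [if_neg]
    · apply ih
      · rw [pmod_idem m _ hm, hstep]
      · intro k hk1 hk2
        exact hnone k (by omega) (by push_cast; push_cast at hk2; linarith)
    · rw [hstep]
      exact hnone (c + 1) (by omega) (by push_cast; omega)

theorem loop_finds (targ add m curr d : Int) (hm : m ≠ 0)
    (hsol : PySem.Int.mod (curr + d * add) m = targ) :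
    ∀ (f : Nat) (val c : Int),
      PySem.Int.mod val m = PySem.Int.mod (curr + c * add) m →
      c < d → d ≤ c + f →
      (∀ k : Int, c < k → k < d → PySem.Int.mod (curr + k * add) m ≠ targ) →
      genpbLoop targ add m val c f = d := by
  intro f
  induction f with
  | zero => intro val c _ h1 h2 _; exfalso; push_cast at h2; omega
  | succ f ih =>
    intro val c hval hcd hdf hmin
    have hstep : PySem.Int.mod (val + add) m = PySem.Int.mod (curr + (c + 1) * add) m := by
      apply pmod_congr m _ _ hm
      have hd : m ∣ val - (curr + c * add) := (pmod_eq_pmod_iff m _ _ hm).mp hval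
      have : val + add - (curr + (c + 1) * add) = val - (curr + c * add) := by ring
      rw [this]; exact hd
    show (if PySem.Int.mod (val + add) m = targ then c + 1
          else genpbLoop targ add m (PySem.Int.mod (val + add) m) (c + 1) f) = d
    by_cases hhit : PySem.Int.mod (val + add) m = targ
    · rw [if_pos hhit]
      by_contra hne
      have : c + 1 < d := by omega
      exact hmin (c + 1) (by omega) this (by rw [← hstep]; exact hhit)
    · rw [if_neg hhit]
      have hd1 : d ≠ c + 1 := by
        intro h; apply hhit; rw [hstep, ← h]; exact hsol
      apply ih
      · rw [pmod_idem m _ hm, hstep]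
      · omega
      · push_cast; push_cast at hdf; omega
      · intro k hk1 hk2; exact hmin k (by omega) hk2

theorem main (curr targ add m limit : Int) (hpre : m ≠ 0 ∨ limit < 1 ∨ curr = targ) :
    genpb curr targ add m limit = genpb_alt curr targ add m limit := by
  by_cases h0 : curr = targ
  · simp [genpb, genpb_alt, h0]
  by_cases hlim : limit < 1
  · have hz : limit.toNat = 0 := by omega
    simp [genpb, genpb_alt, h0, hlim, hz, genpbLoop]
  have hm : m ≠ 0 := by rcases hpre with h|h|h <;> [exact h; omega; exact absurd h h0]
  have hlim1 : (1:Int) ≤ limit := by omega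
  have hfl : (limit.toNat : Int) = limit := by omega
  have hinit : PySem.Int.mod curr m = PySem.Int.mod (curr + 0 * add) m := by ring_nf
  by_cases htm : targ = PySem.Int.mod targ m
  case neg =>
    have hB : genpb_alt curr targ add m limit = -1 := by
      simp [genpb_alt, h0, hlim, htm]
    rw [hB]
    rw [genpb, if_neg h0]
    apply loop_none targ add m curr hm _ _ _ hinit
    intro k _ _ hk
    exact htm (by rw [← hk, pmod_idem m _ hm])
  case pos =>
    simp only [genpb_alt, if_neg h0, if_neg hlim, if_neg (not_not_intro htm)]
    set M : Int := |m| with hMdef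
    have hM : 0 < M := abs_pos.mpr hm
    set a : Int := PySem.Int.mod add M with hadef
    set b : Int := PySem.Int.mod (targ - curr) M with hbdef
    have ha0 : 0 ≤ a := PySem.Int.mod_nonneg (a := add) hM
    have haM : a < M := PySem.Int.mod_lt (a := add) hM
    have hb0 : 0 ≤ b := PySem.Int.mod_nonneg (a := targ - curr) hM
    have hbM : b < M := PySem.Int.mod_lt (a := targ - curr) hM
    have haa : (a.toNat : Int) = a := Int.toNat_of_nonneg ha0
    have hMM : (M.toNat : Int) = M := Int.toNat_of_nonneg (le_of_lt hM)
    set r := egcd a.toNat M.toNat with hrdef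
    set g : Int := r.1 with hgdef
    set x : Int := r.2.1 with hxdef
    have hgval : g = (Nat.gcd M.toNat a.toNat : Int) := egcd_gcd _ _
    have hgpos : 0 < g := by
      rw [hgval]
      exact_mod_cast Nat.gcd_pos_of_pos_left _ (by omega : 0 < M.toNat)
    have hga : g ∣ a := by
      rw [hgval, ← haa]
      exact_mod_cast Nat.gcd_dvd_right M.toNat a.toNat
    have hgM : g ∣ M := by
      rw [hgval, ← hMM]
      exact_mod_cast Nat.gcd_dvd_left M.toNat a.toNat
    have hbez : a * x + M * r.2.2 = g := by
      have h := egcd_bezout a.toNat M.toNat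
      rw [haa, hMM] at h
      exact h
    have hP : ∀ k : Int, PySem.Int.mod (curr + k * add) m = targ ↔ M ∣ (k * a - b) := by
      intro k
      have h1 : M ∣ (curr + k * add - targ) - (k * a - b) := by
        have d1 : M ∣ add - a := pmod_sub_dvd add M
        have d2 : M ∣ (targ - curr) - b := pmod_sub_dvd _ M
        have e : (curr + k * add - targ) - (k * a - b) = k * (add - a) - ((targ - curr) - b) := by ring
        rw [e]
        exact dvd_sub (Dvd.dvd.mul_left d1 k) d2
      constructor
      · intro h
        have h2 : PySem.Int.mod (curr + k * add) m = PySem.Int.mod targ m := by rw [← htm]; exact h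
        have h3 : m ∣ (curr + k * add - targ) := (pmod_eq_pmod_iff m _ _ hm).mp h2
        have h4 : M ∣ (curr + k * add - targ) := (abs_dvd m _).mpr h3
        exact (dvd_congr_sub M _ _ h1).mp h4
      · intro h
        have h4 : M ∣ (curr + k * add - targ) := (dvd_congr_sub M _ _ h1).mpr h
        have h3 : m ∣ (curr + k * add - targ) := (abs_dvd m _).mp h4
        have h2 := (pmod_eq_pmod_iff m _ _ hm).mpr h3
        rw [← htm] at h2
        exact h2
    by_cases hgb : PySem.Int.mod b g ≠ 0
    · rw [if_pos hgb]
      simp only [genpb, if_neg h0]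
      apply loop_none targ add m curr hm _ _ _ hinit
      intro k _ _ hk
      apply hgb
      rw [PySem.Int.mod_eq_zero_iff_dvd]
      have h5 : M ∣ k * a - b := (hP k).mp hk
      have h6 : g ∣ k * a - b := dvd_trans hgM h5
      have h7 : g ∣ k * a := Dvd.dvd.mul_left hga k
      have e : b = k * a - (k * a - b) := by ring
      rw [e]
      exact dvd_sub h7 h6
    · rw [if_neg hgb]
      push Not at hgb
      have hgdb : g ∣ b := (PySem.Int.mod_eq_zero_iff_dvd b g).mp hgb
      obtain ⟨a0, ha0eq⟩ := hga
      obtain ⟨n0, hn0eq⟩ := hgM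
      obtain ⟨b0, hb0eq⟩ := hgdb
      have hgne : g ≠ 0 := ne_of_gt hgpos
      have hfn : PySem.Int.floordiv M g = n0 := by
        rw [PySem.Int.floordiv_eq_ediv_of_pos hgpos, hn0eq, Int.mul_ediv_cancel_left _ hgne]
      have hfb : PySem.Int.floordiv b g = b0 := by
        rw [PySem.Int.floordiv_eq_ediv_of_pos hgpos, hb0eq, Int.mul_ediv_cancel_left _ hgne]
      rw [hfn, hfb]
      set c0 : Int := PySem.Int.mod (b0 * x) n0 with hc0def
      have hn : 0 < n0 := by nlinarith [hM, hn0eq]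
      have hinv : n0 ∣ 1 - a0 * x := by
        refine ⟨r.2.2, ?_⟩
        have h := hbez
        rw [ha0eq, hn0eq] at h
        have h2 : g * (a0 * x + n0 * r.2.2 - 1) = 0 := by ring_nf; linarith [h]
        have h3 : a0 * x + n0 * r.2.2 - 1 = 0 := by
          rcases mul_eq_zero.mp h2 with h | h
          · exact absurd h hgne
          · exact h
        linarith
      have hc0cong : n0 ∣ b0 * x - c0 := pmod_sub_dvd _ n0
      have hchar : ∀ k : Int, M ∣ (k * a - b) ↔ n0 ∣ (k - c0) := by
        intro k
        have s1 : M ∣ (k * a - b) ↔ n0 ∣ (k * a0 - b0) := by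
          rw [hn0eq, ha0eq, hb0eq]
          have e : k * (g * a0) - g * b0 = g * (k * a0 - b0) := by ring
          rw [e]
          exact mul_dvd_mul_iff_left hgne
        have s2 : n0 ∣ (k * a0 - b0) ↔ n0 ∣ (k - b0 * x) := by
          constructor
          · intro h
            have e : k - b0 * x = (k * a0 - b0) * x + k * (1 - a0 * x) := by ring
            rw [e]
            exact dvd_add (h.mul_right x) (hinv.mul_left k)
          · intro h
            have e : k * a0 - b0 = (k - b0 * x) * a0 - b0 * (1 - a0 * x) := by ring
            rw [e]
            exact dvd_sub (h.mul_right a0) (hinv.mul_left b0)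
        have s3 : n0 ∣ (k - b0 * x) ↔ n0 ∣ (k - c0) := by
          apply dvd_congr_sub
          have e : (k - b0 * x) - (k - c0) = -(b0 * x - c0) := by ring
          rw [e]
          exact dvd_neg.mpr hc0cong
        rw [s1, s2, s3]
      have hc00 : 0 ≤ c0 := PySem.Int.mod_nonneg (a := b0 * x) hn
      have hc0n : c0 < n0 := PySem.Int.mod_lt (a := b0 * x) hn
      set c : Int := if 1 ≤ c0 then c0 else n0 with hcdef
      have hc1 : 1 ≤ c := by rw [hcdef]; split_ifs with h <;> omega
      have hcn : c ≤ n0 := by rw [hcdef]; split_ifs with h <;> omega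
      have hcc0 : n0 ∣ c - c0 := by
        rw [hcdef]
        split_ifs with h
        · simp
        · have : c0 = 0 := by omega
          rw [this]
          simp
      have hsolc : PySem.Int.mod (curr + c * add) m = targ := (hP c).mpr ((hchar c).mpr hcc0)
      have hmin : ∀ j : Int, 1 ≤ j → j < c → PySem.Int.mod (curr + j * add) m ≠ targ := by
        intro j h1 h2 hj
        have hd : n0 ∣ j - c0 := (hchar j).mp ((hP j).mp hj)
        have hcj : n0 ∣ c - j := by
          have e : c - j = (c - c0) - (j - c0) := by ring
          rw [e]
          exact dvd_sub hcc0 hd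
        have := Int.eq_zero_of_abs_lt_dvd hcj (by rw [abs_lt]; omega)
        omega
      by_cases hcl : c ≤ limit
      · rw [if_pos hcl]
        simp only [genpb, if_neg h0]
        apply loop_finds targ add m curr c hm hsolc limit.toNat curr 0 hinit (by omega)
        · omega
        · intro k hk1 hk2
          exact hmin k (by omega) hk2
      · rw [if_neg hcl]
        simp only [genpb, if_neg h0]
        apply loop_none targ add m curr hm _ _ _ hinit
        intro k hk1 hk2
        exact hmin k (by omega) (by omega)

-- ===== VERDICT (by name: the statement is the Claim_ definition above) =====
theorem genpb_spec : Claim_equal_genpb := by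
  intro curr_value targ_value add_value mod limit _ hpre
  unfold Spec_genpb
  exact main curr_value targ_value add_value mod limit hpre
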